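-- pv_equiv track=rewrite | github.com/Geryyy/mjlab_robocrane | mjlab_robocrane/train.py | _pick_num_mini_batches
-- ===== SOURCE A (Python) =====
-- import math
--
-- def _pick_num_mini_batches(
--   total_batch_size: int, target_minibatch_size: int, max_batches: int = 64
-- ) -> int:
--   if total_batch_size <= 0:
--     return 1
--   if target_minibatch_size <= 0:
--     return 1
--
--   # Prefer factors for exact splits; fallback to ceiling.
--   desired_batches = max(1, math.ceil(total_batch_size / target_minibatch_size))
--   candidates = [
--     b for b in range(1, min(max_batches, total_batch_size) + 1) if total_batch_size % b == 0
--   ]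
--   if not candidates:
--     return min(max_batches, desired_batches)
--   return min(candidates, key=lambda b: abs(b - desired_batches))
-- ===== SOURCE B (Python) =====
-- import math
--
-- def _pick_num_mini_batches(
--   total_batch_size: int, target_minibatch_size: int, max_batches: int = 64
-- ) -> int:
--   if total_batch_size <= 0 or target_minibatch_size <= 0:
--     return 1
--
--   # exact integer ceiling; >= 1 automatically since both operands are positive
--   desired_batches = -(-total_batch_size // target_minibatch_size)
--   bound = min(max_batches, total_batch_size)
--   # Enumerate divisors in O(sqrt(n)) via complementary pairs (i, n // i).
--   divisors = set()
--   for i in range(1, math.isqrt(total_batch_size) + 1):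
--     if total_batch_size % i == 0:
--       if i <= bound:
--         divisors.add(i)
--       j = total_batch_size // i
--       if j <= bound:
--         divisors.add(j)
--   candidates = sorted(divisors)
--   if not candidates:
--     return min(max_batches, desired_batches)
--   return min(candidates, key=lambda b: abs(b - desired_batches))
-- ===== Notes on version B (the rewrite author's own statement) =====
-- stated objective: faster
-- what changed: Replaces the O(n) scan of every b in range(1, min(max_batches, n)+1) with an O(sqrt(n)) enumeration of divisor pairs (i, n//i) up to isqrt(n) collected into a set, then sorted ascending so equal-distance ties still pick the smaller candidate.
import Mathlib
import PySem

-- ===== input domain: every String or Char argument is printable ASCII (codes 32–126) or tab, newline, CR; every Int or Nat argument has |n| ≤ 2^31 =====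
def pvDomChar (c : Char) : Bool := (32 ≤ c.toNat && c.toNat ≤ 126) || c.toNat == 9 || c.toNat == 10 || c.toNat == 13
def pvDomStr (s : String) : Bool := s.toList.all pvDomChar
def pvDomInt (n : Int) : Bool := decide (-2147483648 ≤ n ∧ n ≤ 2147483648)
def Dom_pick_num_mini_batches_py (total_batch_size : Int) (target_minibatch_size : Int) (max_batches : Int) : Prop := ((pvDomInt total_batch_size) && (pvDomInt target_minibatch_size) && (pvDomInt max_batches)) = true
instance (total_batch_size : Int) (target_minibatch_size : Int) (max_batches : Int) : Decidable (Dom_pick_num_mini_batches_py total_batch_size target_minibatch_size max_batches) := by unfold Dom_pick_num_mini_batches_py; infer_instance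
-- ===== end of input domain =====

-- B replaces A's linear divisor scan by an O(sqrt n) divisor-pair enumeration into a set, sorted ascending (objective: faster).

-- ===== PORT A =====
-- math.ceil(total/target): for 1 ≤ total, target ≤ 2^31 CPython's float division cannot
-- round across an integer boundary, so ceil(total/target) is the exact ceiling -(-total // target).
def pvCeilDiv (a b : Int) : Int := -(PySem.Int.floordiv (-a) b)

def pick_num_mini_batches_py (total_batch_size : Int) (target_minibatch_size : Int) (max_batches : Int) : Int :=
  if total_batch_size ≤ 0 then 1
  else if target_minibatch_size ≤ 0 then 1
  else
    let desired_batches := max 1 (pvCeilDiv total_batch_size target_minibatch_size)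
    let candidates := (PySem.List.pyRange 1 (min max_batches total_batch_size + 1) 1).filter
      (fun b => PySem.Int.mod total_batch_size b == 0)
    if candidates = [] then min max_batches desired_batches
    else -- min(candidates, key=…) on a nonempty list; the .getD 0 default is unreachable
      (PySem.List.min? candidates (fun b => |b - desired_batches|)).getD 0

-- ===== PORT B =====
-- loop body of B's 'for i in range(1, isqrt(n)+1)' divisor-pair collection
def pvDivStep (n bound : Int) (s : PySem.Set Int) (i : Int) : PySem.Set Int :=
  if PySem.Int.mod n i == 0 then
    if PySem.Int.floordiv n i ≤ bound then
      PySem.Set.add (if i ≤ bound then PySem.Set.add s i else s) (PySem.Int.floordiv n i)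
    else
      if i ≤ bound then PySem.Set.add s i else s
  else s

def pick_num_mini_batches_py_alt (total_batch_size : Int) (target_minibatch_size : Int) (max_batches : Int) : Int :=
  if total_batch_size ≤ 0 ∨ target_minibatch_size ≤ 0 then 1
  else
    -- exact integer ceiling -(-n // t)
    let desired_batches := -(PySem.Int.floordiv (-total_batch_size) target_minibatch_size)
    let bound := min max_batches total_batch_size
    -- math.isqrt(n) for n ≥ 1 is exactly Nat.sqrt n.toNat
    let divisors := (PySem.List.pyRange 1 ((Nat.sqrt total_batch_size.toNat : Int) + 1) 1).foldl
      (pvDivStep total_batch_size bound) PySem.Set.empty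
    let candidates := PySem.List.sorted divisors (fun x => x) false
    if candidates = [] then min max_batches desired_batches
    else
      (PySem.List.min? candidates (fun b => |b - desired_batches|)).getD 0

-- ===== PRECONDITION & SPEC =====
def Spec_pick_num_mini_batches_py (total_batch_size : Int) (target_minibatch_size : Int) (max_batches : Int) (out : Int) : Prop := out = pick_num_mini_batches_py_alt total_batch_size target_minibatch_size max_batches
instance (total_batch_size : Int) (target_minibatch_size : Int) (max_batches : Int) (out : Int) : Decidable (Spec_pick_num_mini_batches_py total_batch_size target_minibatch_size max_batches out) := by unfold Spec_pick_num_mini_batches_py; infer_instance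

-- ===== CLAIM (what is proved, stated in full; the proofs are below) =====
def Claim_equal_pick_num_mini_batches_py : Prop := ∀ (total_batch_size : Int) (target_minibatch_size : Int) (max_batches : Int), Dom_pick_num_mini_batches_py total_batch_size target_minibatch_size max_batches → Spec_pick_num_mini_batches_py total_batch_size target_minibatch_size max_batches (pick_num_mini_batches_py total_batch_size target_minibatch_size max_batches)

-- ===== LEMMAS AND PROOFS =====

-- membership in one step of the divisor-pair loop
theorem mem_pvDivStep (n bound : Int) (s : PySem.Set Int) (i x : Int) :
    x ∈ pvDivStep n bound s i ↔
      x ∈ s ∨ (PySem.Int.mod n i = 0 ∧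
        ((x = i ∧ i ≤ bound) ∨ (x = PySem.Int.floordiv n i ∧ x ≤ bound))) := by
  unfold pvDivStep
  split_ifs with h1 h2 h3 h4
  · rw [beq_iff_eq] at h1
    simp only [PySem.Set.mem_add]
    constructor
    · rintro ((h | rfl) | rfl)
      · exact Or.inl h
      · exact Or.inr ⟨h1, Or.inl ⟨rfl, h3⟩⟩
      · exact Or.inr ⟨h1, Or.inr ⟨rfl, h2⟩⟩
    · rintro (h | ⟨-, (⟨rfl, -⟩ | ⟨rfl, -⟩)⟩)
      · exact Or.inl (Or.inl h)
      · exact Or.inl (Or.inr rfl)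
      · exact Or.inr rfl
  · rw [beq_iff_eq] at h1
    simp only [PySem.Set.mem_add]
    constructor
    · rintro (h | rfl)
      · exact Or.inl h
      · exact Or.inr ⟨h1, Or.inr ⟨rfl, h2⟩⟩
    · rintro (h | ⟨-, (⟨rfl, hib⟩ | ⟨rfl, -⟩)⟩)
      · exact Or.inl h
      · exact absurd hib h3
      · exact Or.inr rfl
  · rw [beq_iff_eq] at h1
    simp only [PySem.Set.mem_add]
    constructor
    · rintro (h | rfl)
      · exact Or.inl h
      · exact Or.inr ⟨h1, Or.inl ⟨rfl, h4⟩⟩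
    · rintro (h | ⟨-, (⟨rfl, -⟩ | ⟨rfl, hxb⟩)⟩)
      · exact Or.inl h
      · exact Or.inr rfl
      · exact absurd hxb h2
  · rw [beq_iff_eq] at h1
    constructor
    · exact Or.inl
    · rintro (h | ⟨-, (⟨rfl, hib⟩ | ⟨rfl, hxb⟩)⟩)
      · exact h
      · exact absurd hib h4
      · exact absurd hxb h2
  · rw [beq_iff_eq] at h1
    constructor
    · exact Or.inl
    · rintro (h | ⟨hm, -⟩)
      · exact h
      · exact absurd hm h1

-- membership in the whole fold
theorem mem_foldl_pvDivStep (n bound : Int) (l : List Int) (s : PySem.Set Int) (x : Int) :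
    x ∈ l.foldl (pvDivStep n bound) s ↔
      x ∈ s ∨ ∃ i ∈ l, PySem.Int.mod n i = 0 ∧
        ((x = i ∧ i ≤ bound) ∨ (x = PySem.Int.floordiv n i ∧ x ≤ bound)) := by
  induction l generalizing s with
  | nil => simp
  | cons a t ih =>
    rw [List.foldl_cons, ih, mem_pvDivStep]
    simp only [List.mem_cons]
    constructor
    · rintro ((h | h) | ⟨i, hi, hp⟩)
      · exact Or.inl h
      · exact Or.inr ⟨a, Or.inl rfl, h⟩
      · exact Or.inr ⟨i, Or.inr hi, hp⟩
    · rintro (h | ⟨i, (rfl | hi), hp⟩)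
      · exact Or.inl (Or.inl h)
      · exact Or.inl (Or.inr hp)
      · exact Or.inr ⟨i, hi, hp⟩

theorem nodup_foldl_pvDivStep (n bound : Int) (l : List Int) (s : PySem.Set Int)
    (hs : s.Nodup) : (l.foldl (pvDivStep n bound) s).Nodup := by
  induction l generalizing s with
  | nil => exact hs
  | cons a t ih =>
    refine ih _ ?_
    unfold pvDivStep
    split_ifs <;> repeat (first | assumption | apply PySem.Set.nodup_add)

-- characterisation of the divisor set built by B (for 1 ≤ n, bound ≤ n)
theorem mem_divisors_iff (n bound x : Int) (hn : 1 ≤ n) (hb : bound ≤ n) :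
    (x ∈ (PySem.List.pyRange 1 ((Nat.sqrt n.toNat : Int) + 1) 1).foldl
        (pvDivStep n bound) PySem.Set.empty) ↔ (1 ≤ x ∧ x ≤ bound ∧ x ∣ n) := by
  rw [mem_foldl_pvDivStep]
  have hsq : ∀ a : Int, 1 ≤ a → a * a ≤ n → a ≤ (Nat.sqrt n.toNat : Int) := by
    intro a ha h2
    have hcast : (a.toNat : Int) = a := Int.toNat_of_nonneg (by omega)
    have h3 : a.toNat * a.toNat ≤ n.toNat := by zify; rw [hcast]; omega
    have := Nat.le_sqrt.2 h3
    omega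
  constructor
  · rintro (h | ⟨i, hi, hmod, hx⟩)
    · simp [PySem.Set.empty] at h
    · rw [PySem.List.mem_pyRange_one] at hi
      have hi1 : 1 ≤ i := hi.1
      have hdvd : i ∣ n := (PySem.Int.mod_eq_zero_iff_dvd n i).1 hmod
      have hin : i ≤ n := Int.le_of_dvd (by omega) hdvd
      rcases hx with ⟨rfl, hle⟩ | ⟨rfl, hle⟩
      · exact ⟨hi1, hle, hdvd⟩
      · rw [PySem.Int.floordiv_eq_ediv_of_pos (by omega)]
        rw [PySem.Int.floordiv_eq_ediv_of_pos (by omega)] at hle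
        refine ⟨?_, hle, Int.ediv_dvd_of_dvd hdvd⟩
        · exact (Int.le_ediv_iff_mul_le (by omega)).2 (by omega)
  · rintro ⟨hx1, hxb, hdvd⟩
    have hxn : x ≤ n := le_trans hxb hb
    obtain ⟨k, hk⟩ := hdvd
    have hk1 : 1 ≤ k := by nlinarith
    by_cases hcase : x ≤ k
    · refine Or.inr ⟨x, ?_, (PySem.Int.mod_eq_zero_iff_dvd n x).2 ⟨k, hk⟩,
        Or.inl ⟨rfl, hxb⟩⟩
      rw [PySem.List.mem_pyRange_one]
      have := hsq x hx1 (by nlinarith)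
      omega
    · refine Or.inr ⟨k, ?_, (PySem.Int.mod_eq_zero_iff_dvd n k).2 ⟨x, by rw [hk]; ring⟩,
        Or.inr ⟨?_, hxb⟩⟩
      · rw [PySem.List.mem_pyRange_one]
        have := hsq k hk1 (by nlinarith)
        omega
      · rw [PySem.Int.floordiv_eq_ediv_of_pos (by omega), hk,
          Int.mul_ediv_cancel _ (by omega)]

-- A's candidate list characterised the same way
theorem mem_candA_iff (n bound x : Int) :
    (x ∈ (PySem.List.pyRange 1 (bound + 1) 1).filter (fun b => PySem.Int.mod n b == 0)) ↔
      (1 ≤ x ∧ x ≤ bound ∧ x ∣ n) := by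
  simp only [List.mem_filter, PySem.List.mem_pyRange_one, beq_iff_eq,
    PySem.Int.mod_eq_zero_iff_dvd]
  omega

theorem candA_pairwise (n bound : Int) :
    ((PySem.List.pyRange 1 (bound + 1) 1).filter
      (fun b => PySem.Int.mod n b == 0)).Pairwise (· < ·) :=
  (PySem.List.pairwise_lt_pyRange_one 1 (bound + 1)).filter _

-- for positive n, t the guarded ceiling of A equals B's plain integer ceiling
theorem ceil_eq (n t : Int) (hn : 1 ≤ n) (ht : 1 ≤ t) :
    max 1 (pvCeilDiv n t) = -(PySem.Int.floordiv (-n) t) := by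
  unfold pvCeilDiv
  rw [PySem.Int.floordiv_eq_ediv_of_pos (by omega)]
  have hd := Int.ediv_add_emod (-n) t
  have hr1 := Int.emod_nonneg (-n) (by omega : t ≠ 0)
  have hr2 := Int.emod_lt_of_pos (-n) (by omega : (0:Int) < t)
  have hq : ¬ 0 ≤ (-n) / t := by
    intro h
    nlinarith
  omega

-- the two candidate lists coincide
theorem cand_eq (n m : Int) (hn : 1 ≤ n) :
    PySem.List.sorted ((PySem.List.pyRange 1 ((Nat.sqrt n.toNat : Int) + 1) 1).foldl
        (pvDivStep n (min m n)) PySem.Set.empty) (fun x => x) false =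
      (PySem.List.pyRange 1 (min m n + 1) 1).filter (fun b => PySem.Int.mod n b == 0) := by
  apply PySem.List.sorted_eq_of_perm_of_pairwise_lt
  · rw [List.perm_ext_iff_of_nodup (List.Pairwise.nodup (candA_pairwise n (min m n)))
      (nodup_foldl_pvDivStep n (min m n) _ PySem.Set.empty List.nodup_nil)]
    intro x
    rw [mem_candA_iff, mem_divisors_iff n (min m n) x hn (by omega)]
  · exact candA_pairwise n (min m n)

-- ===== VERDICT (by name: the statement is the Claim_ definition above) =====
theorem pick_num_mini_batches_py_spec : Claim_equal_pick_num_mini_batches_py := by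
  intro n t m _
  unfold Spec_pick_num_mini_batches_py pick_num_mini_batches_py pick_num_mini_batches_py_alt
  by_cases h1 : n ≤ 0
  · simp [h1]
  · by_cases h2 : t ≤ 0
    · simp [h1, h2]
    · have hg : ¬(n ≤ 0 ∨ t ≤ 0) := by omega
      rw [if_neg h1, if_neg h2, if_neg hg]
      rw [ceil_eq n t (by omega) (by omega)]
      simp only [cand_eq n m (by omega)]
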